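-- pv_equiv track=rewrite | github.com/Mind23-2/MindCode-97 | reader/joint_reader.py | joint_input_shape
-- ===== SOURCE A (Python) =====
-- def joint_input_shape(input_shape_list):
--     """
--     joint main task and auxiliary tasks input shape
--     """
--     joint_test_input_shape = input_shape_list[0][1]["backbone"] + input_shape_list[0][1]["task"]
--
--     joint_train_input_shape = [([1, 1], 'int32')] # task_id_shape
--     backbone_input_shape = input_shape_list[0][0]["backbone"]
--     joint_train_input_shape.extend(backbone_input_shape)
--     task_map_id = [(1, len(input_shape_list[0][0]["backbone"]) + 1)]
--
--     for input_shape in input_shape_list: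
--         task_input_shape = input_shape[0]["task"]
--         joint_train_input_shape.extend(task_input_shape)
--         task_map_id.append((task_map_id[-1][1], task_map_id[-1][1] + len(task_input_shape)))
--     return joint_train_input_shape, joint_test_input_shape, task_map_id
-- ===== SOURCE B (Python) =====
-- def joint_input_shape(input_shape_list):
--     """
--     joint main task and auxiliary tasks input shape
--     (recursive decomposition: the task shapes and id ranges for the tail are
--     computed by a recursive call and the current task's contribution is
--     prepended, so the output is assembled back-to-front instead of by a loop
--     that appends and reads the last appended range)
--     """
--     head_train, head_test = input_shape_list[0]
--     joint_test_input_shape = head_test["backbone"] + head_test["task"]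
--     backbone = head_train["backbone"]
--
--     def go(rest, start):
--         # (flattened task shapes, id ranges) for the remaining tasks from offset start
--         if not rest:
--             return [], []
--         t = rest[0][0]["task"]
--         shapes, ranges = go(rest[1:], start + len(t))
--         return t + shapes, [(start, start + len(t))] + ranges
--
--     shapes, ranges = go(input_shape_list, 1 + len(backbone))
--     joint_train_input_shape = [([1, 1], 'int32')] + backbone + shapes
--     return joint_train_input_shape, joint_test_input_shape, [(1, 1 + len(backbone))] + ranges
-- ===== Notes on version B (the rewrite author's own statement) =====
-- stated objective: alternative
-- what changed: B replaces A's iterative loop that appends to two lists in lockstep and reads the previous range's end out of task_map_id[-1] by a recursive decomposition: a recursive helper returns the tail's flattened task shapes and id ranges, and each step prepends its own task's shapes and range, assembling both outputs back-to-front.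
import Mathlib
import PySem

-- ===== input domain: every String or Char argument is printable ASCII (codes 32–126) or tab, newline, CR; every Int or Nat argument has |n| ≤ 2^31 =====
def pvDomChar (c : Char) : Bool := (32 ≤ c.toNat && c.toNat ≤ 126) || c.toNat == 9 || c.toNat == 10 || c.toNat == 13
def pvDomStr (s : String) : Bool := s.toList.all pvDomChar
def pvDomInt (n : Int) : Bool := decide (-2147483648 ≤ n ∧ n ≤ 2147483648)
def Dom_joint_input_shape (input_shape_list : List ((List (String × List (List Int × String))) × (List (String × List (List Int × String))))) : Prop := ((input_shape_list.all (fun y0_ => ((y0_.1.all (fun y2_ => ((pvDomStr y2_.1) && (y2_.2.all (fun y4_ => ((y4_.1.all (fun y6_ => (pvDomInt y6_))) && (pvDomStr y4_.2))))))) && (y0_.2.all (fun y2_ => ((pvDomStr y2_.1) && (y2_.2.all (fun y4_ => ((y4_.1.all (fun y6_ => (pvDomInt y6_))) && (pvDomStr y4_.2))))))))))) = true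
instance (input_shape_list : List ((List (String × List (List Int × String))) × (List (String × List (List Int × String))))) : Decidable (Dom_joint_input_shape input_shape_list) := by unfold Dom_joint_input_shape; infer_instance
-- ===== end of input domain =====

-- B replaces A's append-and-read-last loop by a recursive helper that builds the
-- task shapes and id ranges back-to-front; same cost, alternative decomposition.

-- ===== PORT A =====
-- dict lookup (first match in the insertion-ordered association list)
def pvLookup (d : List (String × List (List Int × String))) (k : String) : Option (List (List Int × String)) :=
  match d with
  | [] => none
  | (k', v) :: rest => if k' = k then some v else pvLookup rest k

-- Literal port of A. Where Python raises (empty list / missing key, excluded by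
-- Pre_) the Option lookups are defaulted with .getD; inside Pre_ this is exact.
def joint_input_shape (input_shape_list : List ((List (String × List (List Int × String))) × (List (String × List (List Int × String))))) : (List (List Int × String)) × (List (List Int × String)) × (List (Int × Int)) :=
  let first := (PySem.List.pyGet? input_shape_list 0).getD ([], [])
  let joint_test_input_shape := (pvLookup first.2 "backbone").getD [] ++ (pvLookup first.2 "task").getD []
  let joint_train_input_shape : List (List Int × String) := [([1, 1], "int32")]
  let backbone_input_shape := (pvLookup first.1 "backbone").getD []
  let joint_train_input_shape := joint_train_input_shape ++ backbone_input_shape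
  let task_map_id : List (Int × Int) := [(1, (((pvLookup first.1 "backbone").getD []).length : Int) + 1)]
  let st := input_shape_list.foldl
    (fun (st : List (List Int × String) × List (Int × Int)) input_shape =>
      let task_input_shape := (pvLookup input_shape.1 "task").getD []
      let last := (PySem.List.pyGet? st.2 (-1)).getD (0, 0)
      (st.1 ++ task_input_shape, st.2 ++ [(last.2, last.2 + (task_input_shape.length : Int))]))
    (joint_train_input_shape, task_map_id)
  (st.1, joint_test_input_shape, st.2)

-- ===== PORT B =====
-- the recursive helper 'go' of Source B: (flattened task shapes, id ranges) for the
-- remaining tasks starting at offset 'start'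
def pvGo (rest : List ((List (String × List (List Int × String))) × (List (String × List (List Int × String))))) (start : Int) : (List (List Int × String)) × (List (Int × Int)) :=
  match rest with
  | [] => ([], [])
  | x :: xs =>
    let t := (pvLookup x.1 "task").getD []
    let p := pvGo xs (start + (t.length : Int))
    (t ++ p.1, (start, start + (t.length : Int)) :: p.2)

-- Literal port of Source B (same defaulting of the lookups as the A port; exact inside Pre_).
def joint_input_shape_alt (input_shape_list : List ((List (String × List (List Int × String))) × (List (String × List (List Int × String))))) : (List (List Int × String)) × (List (List Int × String)) × (List (Int × Int)) :=
  let first := (PySem.List.pyGet? input_shape_list 0).getD ([], [])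
  let joint_test_input_shape := (pvLookup first.2 "backbone").getD [] ++ (pvLookup first.2 "task").getD []
  let backbone := (pvLookup first.1 "backbone").getD []
  let p := pvGo input_shape_list (1 + (backbone.length : Int))
  ([(([1, 1] : List Int), "int32")] ++ backbone ++ p.1, joint_test_input_shape,
   (1, 1 + (backbone.length : Int)) :: p.2)

-- ===== PRECONDITION & SPEC =====
-- Pre_ excludes exactly the inputs where Python A raises: the empty list
-- (IndexError) and inputs whose dicts miss a looked-up key (KeyError).
def Pre_joint_input_shape (input_shape_list : List ((List (String × List (List Int × String))) × (List (String × List (List Int × String))))) : Prop :=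
  input_shape_list ≠ [] ∧
  (∀ h : input_shape_list ≠ [],
    "backbone" ∈ (input_shape_list.head h).2.map Prod.fst ∧
    "task" ∈ (input_shape_list.head h).2.map Prod.fst ∧
    "backbone" ∈ (input_shape_list.head h).1.map Prod.fst) ∧
  (∀ inp ∈ input_shape_list, "task" ∈ inp.1.map Prod.fst)
instance (input_shape_list : List ((List (String × List (List Int × String))) × (List (String × List (List Int × String))))) : Decidable (Pre_joint_input_shape input_shape_list) := by unfold Pre_joint_input_shape; infer_instance

def pvWitness_joint_input_shape : (List ((List (String × List (List Int × String))) × (List (String × List (List Int × String))))) :=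
  [([("backbone", [([3], "f")]), ("task", [([1], "g"), ([2], "h")])],
    [("backbone", [([9], "tb")]), ("task", [([8], "tt")])])]

def Spec_joint_input_shape (input_shape_list : List ((List (String × List (List Int × String))) × (List (String × List (List Int × String))))) (out : (List (List Int × String)) × (List (List Int × String)) × (List (Int × Int))) : Prop := out = joint_input_shape_alt input_shape_list
instance (input_shape_list : List ((List (String × List (List Int × String))) × (List (String × List (List Int × String))))) (out : (List (List Int × String)) × (List (List Int × String)) × (List (Int × Int))) : Decidable (Spec_joint_input_shape input_shape_list out) := by unfold Spec_joint_input_shape; infer_instance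

-- ===== CLAIM (what is proved, stated in full; the proofs are below) =====
def Claim_equal_joint_input_shape : Prop := ∀ (input_shape_list : List ((List (String × List (List Int × String))) × (List (String × List (List Int × String))))), Dom_joint_input_shape input_shape_list → Pre_joint_input_shape input_shape_list → Spec_joint_input_shape input_shape_list (joint_input_shape input_shape_list)

-- ===== LEMMAS AND PROOFS =====

-- the ranges [(e, e+n1), (e+n1, e+n1+n2), …] that both programs compute
def pvRanges (e : Int) : List Int → List (Int × Int)
  | [] => []
  | n :: ns => (e, e + n) :: pvRanges (e + n) ns

def pvTaskOf (inp : (List (String × List (List Int × String))) × (List (String × List (List Int × String)))) : List (List Int × String) :=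
  (pvLookup inp.1 "task").getD []

theorem pvFoldA (xs : List ((List (String × List (List Int × String))) × (List (String × List (List Int × String))))) :
    ∀ (tr : List (List Int × String)) (mp : List (Int × Int)) (a e : Int),
    xs.foldl
      (fun (st : List (List Int × String) × List (Int × Int)) input_shape =>
        let task_input_shape := (pvLookup input_shape.1 "task").getD []
        let last := (PySem.List.pyGet? st.2 (-1)).getD (0, 0)
        (st.1 ++ task_input_shape, st.2 ++ [(last.2, last.2 + (task_input_shape.length : Int))]))
      (tr, mp ++ [(a, e)]) =
    (tr ++ (xs.map pvTaskOf).flatten,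
     (mp ++ [(a, e)]) ++ pvRanges e (xs.map (fun x => ((pvTaskOf x).length : Int)))) := by
  induction xs with
  | nil => intro tr mp a e; simp [pvRanges]
  | cons x xs ih =>
    intro tr mp a e
    simp only [List.foldl_cons]
    rw [PySem.List.pyGet?_neg_one_append_singleton]
    simp only [Option.getD_some]
    have h := ih (tr ++ pvTaskOf x) (mp ++ [(a, e)]) e (e + ((pvTaskOf x).length : Int))
    simp only [List.append_assoc] at h ⊢
    simp only [pvTaskOf] at h
    rw [h]
    simp [pvRanges, pvTaskOf]

theorem pvGo_eq (xs : List ((List (String × List (List Int × String))) × (List (String × List (List Int × String))))) :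
    ∀ e : Int, pvGo xs e = ((xs.map pvTaskOf).flatten, pvRanges e (xs.map (fun x => ((pvTaskOf x).length : Int)))) := by
  induction xs with
  | nil => intro e; simp [pvGo, pvRanges]
  | cons x xs ih =>
    intro e
    simp only [pvGo, ih, List.map_cons, List.flatten_cons, pvRanges, pvTaskOf]

-- ===== VERDICT (by name: the statement is the Claim_ definition above) =====
theorem joint_input_shape_spec : Claim_equal_joint_input_shape := by
  intro isl _ _
  unfold Spec_joint_input_shape joint_input_shape joint_input_shape_alt
  simp only []
  set first := (PySem.List.pyGet? isl 0).getD ([], []) with hfirst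
  set bb := (pvLookup first.1 "backbone").getD [] with hbb
  have hA := pvFoldA isl ([(([1, 1] : List Int), "int32")] ++ bb) [] 1 ((bb.length : Int) + 1)
  simp only [List.nil_append] at hA
  rw [hA, pvGo_eq]
  rw [show (1 : Int) + (bb.length : Int) = (bb.length : Int) + 1 from by ring]
  rfl
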